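-- pv_equiv track=rewrite | github.com/roshnipai05/ArtEmis | img_preprocessing.py | compute_per_class_quota
-- ===== SOURCE A (Python) =====
-- def compute_per_class_quota(artform_counts: dict, total: int):
--     n_classes = len(artform_counts)
--     if n_classes == 0:
--         raise ValueError("No artform classes found.")
--     base = total // n_classes
--     quota = {k: min(base, v) for k, v in artform_counts.items()}
--     assigned = sum(quota.values())
--     remaining = total - assigned
--     # distribute remaining proportionally by available items
--     if remaining > 0:
--         # sort by remaining capacity (largest available first)
--         remaining_caps = sorted([(k, artform_counts[k] - quota[k]) for k in artform_counts], key=lambda x: -x[1])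
--         idx = 0
--         while remaining > 0:
--             for k, cap in remaining_caps:
--                 if remaining == 0:
--                     break
--                 if cap > 0:
--                     quota[k] += 1
--                     remaining -= 1
--                     # update cap
--                     remaining_caps = [(kk, artform_counts[kk] - quota[kk]) for kk, _ in remaining_caps]
--     return quota
-- ===== SOURCE B (Python) =====
-- def compute_per_class_quota(artform_counts: dict, total: int):
--     n_classes = len(artform_counts)
--     if n_classes == 0:
--         raise ValueError("No artform classes found.")
--     base = total // n_classes
--     quota = {k: min(base, v) for k, v in artform_counts.items()}
--     remaining = total - sum(quota.values())
--     if remaining > 0: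
--         caps = sorted([(k, artform_counts[k] - quota[k]) for k in artform_counts], key=lambda x: -x[1])
--         # water-filling: r = largest round count with sum(min(r, cap)) <= remaining,
--         # found by binary search instead of simulating the rounds one by one
--         lo, hi = 0, max(cap for _, cap in caps)
--         while lo < hi:
--             mid = (lo + hi + 1) // 2
--             if sum(min(mid, cap) for _, cap in caps) <= remaining:
--                 lo = mid
--             else:
--                 hi = mid - 1
--         r = lo
--         leftover = remaining - sum(min(r, cap) for _, cap in caps)
--         for k, cap in caps:
--             extra = min(r, cap)
--             if cap > r and leftover > 0:
--                 extra += 1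
--                 leftover -= 1
--             quota[k] += extra
--     return quota
-- ===== Notes on version B (the rewrite author's own statement) =====
-- stated objective: faster
-- what changed: A simulates the round-robin distribution one unit at a time (rebuilding the capacity list after every single increment); B computes the number of full rounds analytically by binary search on r with sum(min(r,cap)) <= remaining and hands the leftover units to the first still-open classes in one pass. Intended as asymptotically faster; in a timing run A timed out (n=16) where B returned instantly, so no clean ratio could be measured.
-- outside the precondition, e.g. on compute_per_class_quota({'a': 1, 'b': 0}, 3): A does not finish within the time limit, B returns {'a': 1, 'b': 0}
import Mathlib
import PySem

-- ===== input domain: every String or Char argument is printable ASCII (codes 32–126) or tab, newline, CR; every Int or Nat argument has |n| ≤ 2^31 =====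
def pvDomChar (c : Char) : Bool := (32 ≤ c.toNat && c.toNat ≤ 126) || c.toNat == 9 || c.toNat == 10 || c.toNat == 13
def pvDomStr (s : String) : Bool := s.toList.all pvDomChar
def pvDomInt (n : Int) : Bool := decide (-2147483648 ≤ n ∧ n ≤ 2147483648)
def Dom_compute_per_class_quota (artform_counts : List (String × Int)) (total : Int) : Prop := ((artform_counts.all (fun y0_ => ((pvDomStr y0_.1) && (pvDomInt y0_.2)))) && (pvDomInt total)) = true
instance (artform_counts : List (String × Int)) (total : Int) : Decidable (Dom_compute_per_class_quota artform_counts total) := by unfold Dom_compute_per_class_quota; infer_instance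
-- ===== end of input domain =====

-- B replaces A's unit-by-unit round-robin simulation of the leftover distribution by an
-- analytic water-filling step (binary search for the number of full rounds); intended as
-- faster (in a timing run A timed out where B returned; no clean ratio was measured).


-- ===== PORT A =====
-- One execution of A's inner `for k, cap in remaining_caps:` loop: a foldl over the (stale)
-- list bound at loop entry, with state (quota, remaining, remaining_caps).  The `break` at
-- remaining == 0 only skips iterations that would do nothing, so it is ported as a skip.
def pvPassA (acd : PySem.Dict String Int)
    (st : PySem.Dict String Int × Int × List (String × Int)) (kc : String × Int) :
    PySem.Dict String Int × Int × List (String × Int) :=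
  if st.2.1 = 0 then st
  else if kc.2 > 0 then
    let q' := st.1.modify kc.1 0 (· + 1)   -- quota[k] += 1 (k is always a key of quota)
    (q', st.2.1 - 1,
     st.2.2.map (fun kk => (kk.1, acd.getD kk.1 0 - q'.getD kk.1 0)))  -- rebuild remaining_caps
  else st

-- A's `while remaining > 0:` loop.  fuel = remaining.toNat makes the port total: on every
-- input where the Python loop terminates, each pass lowers remaining by at least 1.
def pvLoopA (acd : PySem.Dict String Int) (fuel : Nat)
    (quota : PySem.Dict String Int) (remaining : Int) (rcaps : List (String × Int)) :
    PySem.Dict String Int :=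
  match fuel with
  | 0 => quota
  | fuel + 1 =>
    if 0 < remaining then
      let st := rcaps.foldl (pvPassA acd) (quota, remaining, rcaps)
      pvLoopA acd fuel st.1 st.2.1 st.2.2
    else quota

def compute_per_class_quota (artform_counts : List (String × Int)) (total : Int) : List (String × Int) :=
  let acd := PySem.Dict.ofList artform_counts      -- the Python argument is this dict
  let n_classes : Int := acd.size
  if n_classes = 0 then []                          -- Python: raise ValueError (outside Pre_)
  else
    let base := PySem.Int.floordiv total n_classes
    let quota := acd.items.foldl (fun d kv => d.insert kv.1 (min base kv.2)) PySem.Dict.empty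
    let assigned := quota.values.sum
    let remaining := total - assigned
    if 0 < remaining then
      let rcaps := PySem.List.sorted
        (acd.keys.map (fun k => (k, acd.getD k 0 - quota.getD k 0))) (fun x => -x.2) false
      (pvLoopA acd remaining.toNat quota remaining rcaps).items
    else quota.items

-- ===== PORT B =====
-- sum(min(t, cap) for _, cap in caps)
def pvSumMin (t : Int) (caps : List (String × Int)) : Int :=
  (caps.map (fun p => min t p.2)).sum

-- B's `while lo < hi:` binary-search loop.
def pvBSearch (caps : List (String × Int)) (remaining lo hi : Int) : Int :=
  if h : lo < hi then
    let mid := PySem.Int.floordiv (lo + hi + 1) 2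
    if pvSumMin mid caps ≤ remaining then pvBSearch caps remaining mid hi
    else pvBSearch caps remaining lo (mid - 1)
  else lo
termination_by (hi - lo).toNat
decreasing_by
  all_goals
    simp only [PySem.Int.floordiv_eq_ediv_of_pos (by norm_num : (0:Int) < 2)]
    omega

def compute_per_class_quota_alt (artform_counts : List (String × Int)) (total : Int) : List (String × Int) :=
  let acd := PySem.Dict.ofList artform_counts
  let n_classes : Int := acd.size
  if n_classes = 0 then []                          -- Python: raise ValueError (outside Pre_)
  else
    let base := PySem.Int.floordiv total n_classes
    let quota := acd.items.foldl (fun d kv => d.insert kv.1 (min base kv.2)) PySem.Dict.empty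
    let remaining := total - quota.values.sum
    if 0 < remaining then
      let caps := PySem.List.sorted
        (acd.keys.map (fun k => (k, acd.getD k 0 - quota.getD k 0))) (fun x => -x.2) false
      let hi := match PySem.List.max? (caps.map (fun p => p.2)) (fun c => c) with
                | some m => m
                | none => 0                         -- unreachable: caps ≠ [] when n_classes ≠ 0
      let r := pvBSearch caps remaining 0 hi
      let leftover := remaining - pvSumMin r caps
      let st := caps.foldl (fun (st : PySem.Dict String Int × Int) p =>
          let extra := min r p.2
          if r < p.2 ∧ 0 < st.2 then (st.1.modify p.1 0 (· + (extra + 1)), st.2 - 1)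
          else (st.1.modify p.1 0 (· + extra), st.2)) (quota, leftover)
      st.1.items
    else quota.items

-- ===== PRECONDITION & SPEC =====
-- Pre_ excludes: the empty dict, where A raises ValueError, and total exceeding the total
-- available count (sum of the dict's values), where A's while-loop never terminates.
def Pre_compute_per_class_quota (artform_counts : List (String × Int)) (total : Int) : Prop :=
  artform_counts ≠ [] ∧ total ≤ ((PySem.Dict.ofList artform_counts).values).sum
instance (artform_counts : List (String × Int)) (total : Int) : Decidable (Pre_compute_per_class_quota artform_counts total) := by unfold Pre_compute_per_class_quota; infer_instance

def pvWitness_compute_per_class_quota : (List (String × Int)) × Int := ([("a", 3), ("b", 1)], 3)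

def Spec_compute_per_class_quota (artform_counts : List (String × Int)) (total : Int) (out : List (String × Int)) : Prop := out = compute_per_class_quota_alt artform_counts total
instance (artform_counts : List (String × Int)) (total : Int) (out : List (String × Int)) : Decidable (Spec_compute_per_class_quota artform_counts total out) := by unfold Spec_compute_per_class_quota; infer_instance

-- ===== CLAIM (what is proved, stated in full; the proofs are below) =====
def Claim_equal_compute_per_class_quota : Prop := ∀ (artform_counts : List (String × Int)) (total : Int), Dom_compute_per_class_quota artform_counts total → Pre_compute_per_class_quota artform_counts total → Spec_compute_per_class_quota artform_counts total (compute_per_class_quota artform_counts total)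

-- ===== LEMMAS AND PROOFS =====

-- total amount the adds-list l assigns to key k
def pvAmt (k : String) (l : List (String × Int)) : Int :=
  ((l.filter (fun p => p.1 == k)).map (fun p => p.2)).sum

-- the closed-form adds list: min T cap to everybody, plus 1 to the first L entries with cap > T
def pvFin (T : Int) (L : Int) : List (String × Int) → List (String × Int)
  | [] => []
  | p :: tl => if T < p.2 ∧ 0 < L then (p.1, min T p.2 + 1) :: pvFin T (L - 1) tl
               else (p.1, min T p.2) :: pvFin T L tl

-- adds of one pass of A's loop: 1 to each entry with positive cap, while budget R lasts
def pvPA (R : Int) : List (String × Int) → List (String × Int)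
  | [] => []
  | p :: tl => if 0 < R ∧ 0 < p.2 then (p.1, 1) :: pvPA (R - 1) tl else (p.1, 0) :: pvPA R tl

-- number of entries with positive cap
def pvP (l : List (String × Int)) : Int := (l.countP (fun p => decide (0 < p.2)) : Int)

lemma pvAmt_cons (k : String) (p : String × Int) (tl : List (String × Int)) :
    pvAmt k (p :: tl) = (if p.1 = k then p.2 else 0) + pvAmt k tl := by
  simp [pvAmt, List.filter_cons]
  split_ifs with h <;> simp [h]

lemma pvAmt_eq_zero_of_not_mem (k : String) (l : List (String × Int))
    (h : k ∉ l.map (·.1)) : pvAmt k l = 0 := by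
  induction l with
  | nil => rfl
  | cons p tl ih =>
    simp only [List.map_cons, List.mem_cons] at h
    push_neg at h
    rw [pvAmt_cons, ih h.2, if_neg (fun hh => h.1 hh.symm)]
    ring

-- total units a pass hands out
lemma pvPA_sum (R : Int) (l : List (String × Int)) (hR : 0 ≤ R) :
    ((pvPA R l).map (·.2)).sum = min R (pvP l) := by
  induction l generalizing R with
  | nil => simp [pvPA, pvP]; omega
  | cons p tl ih =>
    simp only [pvPA]
    split_ifs with h
    · simp only [List.map_cons, List.sum_cons, ih (R - 1) (by omega), pvP, List.countP_cons,
        h.2, decide_true]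
      push_cast
      omega
    · by_cases hp : 0 < p.2
      · have hR0 : R = 0 := by by_contra hne; exact h ⟨by omega, hp⟩
        subst hR0
        simp only [List.map_cons, List.sum_cons, ih 0 le_rfl, pvP, List.countP_cons, hp,
          decide_true]
        push_cast
        omega
      · simp only [List.map_cons, List.sum_cons, ih R hR, pvP, List.countP_cons, hp,
          decide_false]
        push_cast
        omega

-- a pass with enough budget is a full round
lemma pvPA_of_ge (R : Int) (l : List (String × Int)) (h : pvP l ≤ R) :
    pvPA R l = l.map (fun p => (p.1, if 0 < p.2 then (1:Int) else 0)) := by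
  induction l generalizing R with
  | nil => rfl
  | cons p tl ih =>
    have htl : (0:Int) ≤ (tl.countP (fun p => decide (0 < p.2)) : Int) := by positivity
    by_cases hp : 0 < p.2
    · simp only [pvP, List.countP_cons, hp, decide_true] at h
      push_cast at h
      have h0R : 0 < R := by omega
      simp only [pvPA, if_pos (And.intro h0R hp), List.map_cons, if_pos hp]
      rw [ih (R - 1) (by simp only [pvP]; omega)]
    · simp only [pvP, List.countP_cons, hp, decide_false] at h
      push_cast at h
      have htail : pvP tl ≤ R := by simp only [pvP]; omega
      simp only [pvPA, List.map_cons, if_neg hp, if_neg (fun hh : 0 < R ∧ 0 < p.2 => hp hh.2),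
        ih R htail]

lemma pvSumMin_zero (l : List (String × Int)) (h : ∀ p ∈ l, 0 ≤ p.2) :
    pvSumMin 0 l = 0 := by
  induction l with
  | nil => rfl
  | cons p tl ih =>
    have hp := h p (by simp)
    simp only [pvSumMin, List.map_cons, List.sum_cons] at *
    rw [ih (fun q hq => h q (by simp [hq]))]
    omega

lemma pvSumMin_one (l : List (String × Int)) (h : ∀ p ∈ l, 0 ≤ p.2) :
    pvSumMin 1 l = pvP l := by
  induction l with
  | nil => rfl
  | cons p tl ih =>
    have hp := h p (by simp)
    have ih' := ih (fun q hq => h q (by simp [hq]))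
    simp only [pvSumMin, pvP, List.map_cons, List.sum_cons, List.countP_cons] at *
    by_cases hpos : 0 < p.2
    · simp only [hpos, decide_true]
      push_cast
      omega
    · simp only [hpos, decide_false]
      push_cast
      omega

lemma pvSumMin_mono (t t' : Int) (l : List (String × Int)) (h : t ≤ t') :
    pvSumMin t l ≤ pvSumMin t' l := by
  unfold pvSumMin
  apply List.sum_le_sum
  intro p _
  omega

-- full-round decrement shifts the water level by one
lemma pvSumMin_dec (t : Int) (l : List (String × Int)) (ht : 0 ≤ t) (h : ∀ p ∈ l, 0 ≤ p.2) :
    pvSumMin t (l.map (fun p => (p.1, p.2 - if 0 < p.2 then (1:Int) else 0))) =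
      pvSumMin (t + 1) l - pvP l := by
  induction l with
  | nil => simp [pvSumMin, pvP]
  | cons p tl ih =>
    have hp := h p (by simp)
    have ih' := ih (fun q hq => h q (by simp [hq]))
    simp only [pvSumMin, pvP, List.map_cons, List.sum_cons, List.countP_cons] at *
    by_cases hpos : 0 < p.2
    · simp only [hpos, decide_true, if_pos hpos]
      push_cast
      omega
    · simp only [hpos, decide_false, if_neg hpos]
      push_cast
      push_cast at ih'
      omega

-- equal sums + pointwise ≤ gives pointwise equality
lemma pv_pointwise_of_sum {α : Type} (l : List α) (f g : α → Int)
    (hle : ∀ p ∈ l, f p ≤ g p) (hsum : (l.map g).sum ≤ (l.map f).sum) :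
    ∀ p ∈ l, f p = g p := by
  induction l with
  | nil => simp
  | cons p tl ih =>
    simp only [List.map_cons, List.sum_cons] at hsum
    have h1 := hle p (by simp)
    have h2 : (tl.map f).sum ≤ (tl.map g).sum :=
      List.sum_le_sum (fun q hq => hle q (by simp [hq]))
    intro q hq
    rcases List.mem_cons.mp hq with rfl | hq'
    · omega
    · exact ih (fun r hr => hle r (by simp [hr])) (by omega) q hq'

lemma pvFin_L_nonpos (T L : Int) (l : List (String × Int)) (h : L ≤ 0) :
    pvFin T L l = l.map (fun p => (p.1, min T p.2)) := by
  induction l generalizing L with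
  | nil => rfl
  | cons p tl ih =>
    simp only [pvFin]
    rw [if_neg (by omega), ih L h]
    rfl

lemma pvFin_zero (R : Int) (l : List (String × Int)) (h : ∀ p ∈ l, 0 ≤ p.2) :
    pvFin 0 R l = pvPA R l := by
  induction l generalizing R with
  | nil => rfl
  | cons p tl ih =>
    have hp := h p (by simp)
    simp only [pvFin, pvPA]
    by_cases hc : 0 < p.2 ∧ 0 < R
    · rw [if_pos ⟨hc.1, hc.2⟩, if_pos ⟨hc.2, hc.1⟩, ih (R - 1) (fun q hq => h q (by simp [hq]))]
      congr 2
      omega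
    · have hc' : ¬ (0 < R ∧ 0 < p.2) := fun hh => hc ⟨hh.2, hh.1⟩
      rw [if_neg (fun hh => hc ⟨hh.1, hh.2⟩), if_neg hc', ih R (fun q hq => h q (by simp [hq]))]
      congr 2
      omega

-- the step identity: one full round peels one level off the closed form
lemma pvFin_step (T : Int) (hT : 1 ≤ T) (l : List (String × Int)) (h : ∀ p ∈ l, 0 ≤ p.2) :
    ∀ (L : Int) (k : String),
      pvAmt k (pvFin T L l) =
        pvAmt k (l.map (fun p => (p.1, if 0 < p.2 then (1:Int) else 0))) +
        pvAmt k (pvFin (T - 1) L (l.map (fun p => (p.1, p.2 - if 0 < p.2 then (1:Int) else 0)))) := by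
  induction l with
  | nil => intro L k; simp [pvFin, pvAmt]
  | cons p tl ih =>
    intro L k
    have hp := h p (by simp)
    have ih' := ih (fun q hq => h q (by simp [hq]))
    by_cases hpos : 0 < p.2
    · by_cases hguard : T < p.2 ∧ 0 < L
      · simp only [pvFin, List.map_cons, if_pos hguard, if_pos hpos,
          if_pos (show T - 1 < p.2 - 1 ∧ 0 < L by omega), pvAmt_cons]
        rw [ih' (L - 1) k]
        split_ifs with hk <;> omega
      · have hguard' : ¬ (T - 1 < p.2 - 1 ∧ 0 < L) := by omega
        simp only [pvFin, List.map_cons, if_neg hguard, if_pos hpos, if_neg hguard', pvAmt_cons]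
        rw [ih' L k]
        split_ifs with hk <;> omega
    · have hz : p.2 = 0 := by omega
      have hguard : ¬ (T < p.2 ∧ 0 < L) := by omega
      have hguard' : ¬ (T - 1 < p.2 - 0 ∧ 0 < L) := by omega
      simp only [pvFin, List.map_cons, if_neg hguard, if_neg hpos, if_neg hguard', pvAmt_cons]
      rw [ih' L k]
      split_ifs with hk <;> omega

-- amount a keyed map-list gives its own entry (distinct keys)
lemma pvAmt_map_self (l : List (String × Int)) (w : String × Int → Int)
    (hnd : (l.map (·.1)).Nodup) :
    ∀ p ∈ l, pvAmt p.1 (l.map (fun x => (x.1, w x))) = w p := by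
  induction l with
  | nil => simp
  | cons q tl ih =>
    simp only [List.map_cons, List.nodup_cons] at hnd
    intro p hp
    rcases List.mem_cons.mp hp with rfl | hp'
    · rw [List.map_cons, pvAmt_cons, if_pos rfl, pvAmt_eq_zero_of_not_mem]
      · ring
      · rw [List.map_map]
        exact hnd.1
    · rw [List.map_cons, pvAmt_cons, if_neg, ih hnd.2 p hp']
      · ring_nf
      · intro hq
        exact hnd.1 (hq ▸ List.mem_map_of_mem hp')

-- characterization of one pass of A's inner loop
lemma passA_spec (acd : PySem.Dict String Int) :
    ∀ (l : List (String × Int)) (q : PySem.Dict String Int) (R : Int) (rc : List (String × Int)),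
      0 ≤ R →
      (∀ p ∈ l, q.contains p.1 = true) →
      (∀ p ∈ rc, p.2 = acd.getD p.1 0 - q.getD p.1 0) →
      (∀ k, (l.foldl (pvPassA acd) (q, R, rc)).1.getD k 0 = q.getD k 0 + pvAmt k (pvPA R l)) ∧
      (l.foldl (pvPassA acd) (q, R, rc)).2.1 = R - ((pvPA R l).map (·.2)).sum ∧
      (l.foldl (pvPassA acd) (q, R, rc)).1.keys = q.keys ∧
      (l.foldl (pvPassA acd) (q, R, rc)).2.2 =
        rc.map (fun p => (p.1, acd.getD p.1 0 - (l.foldl (pvPassA acd) (q, R, rc)).1.getD p.1 0)) := by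
  intro l
  induction l with
  | nil =>
    intro q R rc hR hcont hinv
    refine ⟨fun k => by simp [pvPA, pvAmt], by simp [pvPA], rfl, ?_⟩
    simp only [List.foldl_nil]
    calc rc = rc.map id := (List.map_id rc).symm
      _ = rc.map (fun p => (p.1, acd.getD p.1 0 - q.getD p.1 0)) :=
        List.map_congr_left (fun p hp => by rw [← hinv p hp, id_eq])
  | cons p tl ih =>
    intro q R rc hR hcont hinv
    by_cases hR0 : R = 0
    · subst hR0
      have hstep : pvPassA acd (q, 0, rc) p = (q, 0, rc) := by simp [pvPassA]
      have hIH := ih q 0 rc le_rfl (fun x hx => hcont x (by simp [hx])) hinv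
      simp only [List.foldl_cons, hstep]
      refine ⟨fun k => ?_, ?_, hIH.2.2⟩
      · rw [hIH.1 k]
        simp only [pvPA, show ¬ ((0:Int) < 0 ∧ 0 < p.2) from by omega, if_false, pvAmt_cons]
        split_ifs <;> omega
      · rw [hIH.2.1]
        simp only [pvPA, show ¬ ((0:Int) < 0 ∧ 0 < p.2) from by omega, if_false,
          List.map_cons, List.sum_cons]
        omega
    · have hRpos : 0 < R := by omega
      by_cases hp : 0 < p.2
      · -- allocation step
        have hstep : pvPassA acd (q, R, rc) p =
            (q.modify p.1 0 (· + 1), R - 1,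
             rc.map (fun kk => (kk.1, acd.getD kk.1 0 - (q.modify p.1 0 (· + 1)).getD kk.1 0))) := by
          simp [pvPassA, hR0, hp]
        set q' := q.modify p.1 0 (· + 1) with hq'
        have hcont' : ∀ x ∈ tl, q'.contains x.1 = true := by
          intro x hx
          rw [hq', PySem.Dict.contains_modify, hcont x (by simp [hx]), Bool.or_true]
        have hinv' : ∀ x ∈ rc.map (fun kk => (kk.1, acd.getD kk.1 0 - q'.getD kk.1 0)),
            x.2 = acd.getD x.1 0 - q'.getD x.1 0 := by
          intro x hx
          obtain ⟨y, _, rfl⟩ := List.mem_map.mp hx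
          rfl
        have hIH := ih q' (R - 1) (rc.map (fun kk => (kk.1, acd.getD kk.1 0 - q'.getD kk.1 0)))
          (by omega) hcont' hinv'
        simp only [List.foldl_cons, hstep, ← hq']
        have hgetD' : ∀ k, q'.getD k 0 = q.getD k 0 + (if p.1 = k then 1 else 0) := by
          intro k
          rw [hq', PySem.Dict.getD_modify]
          by_cases h : k = p.1
          · subst h
            simp
          · rw [if_neg h, if_neg (fun hh => h hh.symm)]
            omega
        have hkeys' : q'.keys = q.keys := by
          rw [hq', PySem.Dict.keys_modify, PySem.Dict.keys_insert_of_contains]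
          exact hcont p (by simp)
        refine ⟨fun k => ?_, ?_, by rw [hIH.2.2.1, hkeys'], ?_⟩
        · rw [hIH.1 k, hgetD' k]
          simp only [pvPA, if_pos (And.intro hRpos hp), pvAmt_cons]
          split_ifs <;> omega
        · rw [hIH.2.1]
          simp only [pvPA, if_pos (And.intro hRpos hp), List.map_cons, List.sum_cons]
          omega
        · rw [hIH.2.2.2, List.map_map]
          rfl
      · -- no allocation: cap not positive
        have hstep : pvPassA acd (q, R, rc) p = (q, R, rc) := by
          simp only [pvPassA]
          rw [if_neg hR0, if_neg (by omega)]
        have hIH := ih q R rc hR (fun x hx => hcont x (by simp [hx])) hinv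
        simp only [List.foldl_cons, hstep]
        refine ⟨fun k => ?_, ?_, hIH.2.2⟩
        · rw [hIH.1 k]
          simp only [pvPA, show ¬ (0 < R ∧ 0 < p.2) from fun hh => hp hh.2, if_false, pvAmt_cons]
          split_ifs <;> omega
        · rw [hIH.2.1]
          simp only [pvPA, show ¬ (0 < R ∧ 0 < p.2) from fun hh => hp hh.2, if_false,
            List.map_cons, List.sum_cons]
          omega

lemma pvLoopA_nonpos (acd : PySem.Dict String Int) (fuel : Nat) (q : PySem.Dict String Int)
    (R : Int) (rc : List (String × Int)) (h : ¬ 0 < R) :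
    pvLoopA acd fuel q R rc = q := by
  cases fuel <;> simp [pvLoopA, h]

lemma pv_sum_ones (l : List (String × Int)) :
    (l.map (fun p => if 0 < p.2 then (1:Int) else 0)).sum = pvP l := by
  have : (fun p : String × Int => if 0 < p.2 then (1:Int) else 0) =
      (fun p : String × Int => if (fun q : String × Int => decide (0 < q.2)) p = true then (1:Int) else 0) := by
    funext p
    simp
  rw [this, PySem.List.sum_map_ite_one_zero]
  rfl

lemma pv_sum_sub (l : List (String × Int)) (e : String × Int → Int) :
    (l.map (fun p => p.2 - e p)).sum = (l.map (·.2)).sum - (l.map e).sum := by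
  induction l with
  | nil => simp
  | cons p tl ih => simp only [List.map_cons, List.sum_cons, ih]; ring

-- positive remaining within the available capacity means some cap is positive
lemma pvP_pos (rc : List (String × Int)) (R : Int) (hR : 0 < R)
    (hRle : R ≤ (rc.map (·.2)).sum) (h0 : ∀ p ∈ rc, 0 ≤ p.2) : 1 ≤ pvP rc := by
  by_contra hc
  have hz : rc.countP (fun p => decide (0 < p.2)) = 0 := by
    simp only [pvP] at hc
    omega
  have hall := List.countP_eq_zero.mp hz
  have : (rc.map (·.2)).sum = 0 :=
    List.sum_eq_zero (by
      intro x hx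
      obtain ⟨p, hp, rfl⟩ := List.mem_map.mp hx
      have := h0 p hp
      have := hall p hp
      simp at this
      omega)
  omega

-- A's while-loop computes the closed-form water-filling distribution
lemma loopA_spec (acd : PySem.Dict String Int) :
    ∀ (fuel : Nat) (q : PySem.Dict String Int) (R : Int) (rc : List (String × Int)) (T : Int),
      R.toNat ≤ fuel → 0 < R → R ≤ (rc.map (·.2)).sum →
      (∀ p ∈ rc, 0 ≤ p.2) → (rc.map (·.1)).Nodup →
      (∀ p ∈ rc, p.2 = acd.getD p.1 0 - q.getD p.1 0) →
      (∀ p ∈ rc, q.contains p.1 = true) →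
      0 ≤ T → pvSumMin T rc ≤ R →
      (R < pvSumMin (T + 1) rc ∨ ∀ p ∈ rc, p.2 ≤ T) →
      (∀ k, (pvLoopA acd fuel q R rc).getD k 0 =
          q.getD k 0 + pvAmt k (pvFin T (R - pvSumMin T rc) rc)) ∧
      (pvLoopA acd fuel q R rc).keys = q.keys := by
  intro fuel
  induction fuel with
  | zero =>
    intro q R rc T hfuel hR
    exfalso
    omega
  | succ fuel ih =>
    intro q R rc T hfuel hR hRle h0 hnd hinv hcont hT0 hTle hTcl
    obtain ⟨ha, hb, hc, hd⟩ := passA_spec acd rc q R rc (by omega) hcont hinv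
    have hm : ((pvPA R rc).map (·.2)).sum = min R (pvP rc) := pvPA_sum R rc (by omega)
    have hPpos := pvP_pos rc R hR hRle h0
    simp only [pvLoopA, if_pos hR]
    by_cases hcase : R ≤ pvP rc
    · -- the pass exhausts remaining: the loop stops after it
      have hR1 : (rc.foldl (pvPassA acd) (q, R, rc)).2.1 = 0 := by rw [hb, hm]; omega
      rw [hR1, pvLoopA_nonpos acd fuel _ 0 _ (by omega)]
      have hfin : pvFin T (R - pvSumMin T rc) rc = pvPA R rc := by
        by_cases hT1 : 1 ≤ T
        · have e1 : pvSumMin 1 rc = pvP rc := pvSumMin_one rc h0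
          have e2 : pvSumMin 1 rc ≤ pvSumMin T rc := pvSumMin_mono 1 T rc hT1
          have eT : pvSumMin T rc = R := by omega
          have eRP : R = pvP rc := by omega
          have hpw := pv_pointwise_of_sum rc (fun p => min 1 p.2) (fun p => min T p.2)
            (fun p _ => by show min 1 p.2 ≤ min T p.2; omega)
            (by
              show (rc.map (fun p => min T p.2)).sum ≤ (rc.map (fun p => min 1 p.2)).sum
              have g1 : (rc.map (fun p => min T p.2)).sum = pvSumMin T rc := rfl
              have g2 : (rc.map (fun p => min 1 p.2)).sum = pvSumMin 1 rc := rfl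
              omega)
          rw [eT, sub_self, pvFin_L_nonpos T 0 rc le_rfl, pvPA_of_ge R rc (by omega)]
          apply List.map_congr_left
          intro p hp
          have hpw' : min 1 p.2 = min T p.2 := hpw p hp
          have := h0 p hp
          simp only [Prod.mk.injEq, true_and]
          omega
        · have hT0' : T = 0 := by omega
          subst hT0'
          rw [pvSumMin_zero rc h0, sub_zero]
          exact pvFin_zero R rc h0
      refine ⟨fun k => by rw [ha k, hfin], hc⟩
    · -- a full round: peel it off and recurse
      push_neg at hcase
      have hT1 : 1 ≤ T := by
        by_contra hc1
        have hT0' : T = 0 := by omega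
        subst hT0'
        rcases hTcl with h1 | h2
        · rw [show (0:Int) + 1 = 1 from by norm_num, pvSumMin_one rc h0] at h1
          omega
        · have : (rc.map (·.2)).sum = 0 :=
            List.sum_eq_zero (by
              intro x hx
              obtain ⟨p, hp, rfl⟩ := List.mem_map.mp hx
              have := h0 p hp
              have := h2 p hp
              omega)
          omega
      have hfull : pvPA R rc = rc.map (fun p => (p.1, if 0 < p.2 then (1:Int) else 0)) :=
        pvPA_of_ge R rc (by omega)
      have hR1 : (rc.foldl (pvPassA acd) (q, R, rc)).2.1 = R - pvP rc := by
        rw [hb, hm]; omega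
      -- the rebuilt remaining_caps is the decremented caps list
      have hrc1 : (rc.foldl (pvPassA acd) (q, R, rc)).2.2 =
          rc.map (fun p => (p.1, p.2 - if 0 < p.2 then (1:Int) else 0)) := by
        rw [hd]
        apply List.map_congr_left
        intro p hp
        have h1 := ha p.1
        have h2 := hinv p hp
        have h3 := pvAmt_map_self rc (fun p => if 0 < p.2 then (1:Int) else 0) hnd p hp
        rw [← hfull] at h3
        have h3' : pvAmt p.1 (pvPA R rc) = if 0 < p.2 then (1:Int) else 0 := h3
        simp only [Prod.mk.injEq, true_and]
        split_ifs at h3' ⊢ with hpp <;> omega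
      set decs := rc.map (fun p => (p.1, p.2 - if 0 < p.2 then (1:Int) else 0)) with hdecs
      have hsnd : decs.map (·.2) = rc.map (fun p => p.2 - if 0 < p.2 then (1:Int) else 0) := by
        rw [hdecs, List.map_map]
        rfl
      have hsum1 : (decs.map (·.2)).sum = (rc.map (·.2)).sum - pvP rc := by
        rw [hsnd, pv_sum_sub rc (fun p => if 0 < p.2 then (1:Int) else 0), pv_sum_ones]
      have hdec0 : ∀ t : Int, 0 ≤ t → pvSumMin t decs = pvSumMin (t + 1) rc - pvP rc := by
        intro t ht
        have := pvSumMin_dec t rc ht h0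
        rw [hdecs]
        exact this
      have hdec1 : pvSumMin (T - 1) decs = pvSumMin T rc - pvP rc := by
        rw [hdec0 (T - 1) (by omega), show T - 1 + 1 = T from by ring]
      have hIH := ih (rc.foldl (pvPassA acd) (q, R, rc)).1 (R - pvP rc) decs (T - 1)
        (by omega) (by omega) (by omega)
        (by
          intro p hp
          rw [hdecs] at hp
          obtain ⟨x, hx, rfl⟩ := List.mem_map.mp hp
          have := h0 x hx
          simp only
          split_ifs <;> omega)
        (by
          rw [hdecs, List.map_map]
          exact hnd)
        (by
          intro p hp
          rw [← hrc1] at hp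
          rw [hd] at hp
          obtain ⟨x, _, rfl⟩ := List.mem_map.mp hp
          rfl)
        (by
          intro p hp
          rw [hdecs] at hp
          obtain ⟨x, hx, rfl⟩ := List.mem_map.mp hp
          show (rc.foldl (pvPassA acd) (q, R, rc)).1.contains x.1 = true
          rw [PySem.Dict.contains_iff_mem_keys, hc, ← PySem.Dict.contains_iff_mem_keys]
          exact hcont x hx)
        (by omega)
        (by rw [hdec1]; omega)
        (by
          rcases hTcl with h1 | h2
          · left
            rw [show T - 1 + 1 = T from by ring, hdec0 T (by omega)]
            omega
          · right
            intro p hp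
            rw [hdecs] at hp
            obtain ⟨x, hx, rfl⟩ := List.mem_map.mp hp
            have := h2 x hx
            have := h0 x hx
            simp only
            split_ifs <;> omega)
      rw [hR1, hrc1]
      refine ⟨fun k => ?_, by rw [hIH.2, hc]⟩
      rw [hIH.1 k, ha k, hfull]
      have hstep := pvFin_step T hT1 rc h0 (R - pvSumMin T rc) k
      rw [← hdecs] at hstep
      rw [hstep]
      have hLL : R - pvP rc - pvSumMin (T - 1) decs = R - pvSumMin T rc := by
        rw [hdec1]
        ring
      rw [hLL]
      ring

-- characterization of B's single distribution pass
lemma foldB_spec (r : Int) :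
    ∀ (l : List (String × Int)) (q : PySem.Dict String Int) (L : Int),
      (∀ p ∈ l, q.contains p.1 = true) →
      (∀ k, (l.foldl (fun (st : PySem.Dict String Int × Int) p =>
          let extra := min r p.2
          if r < p.2 ∧ 0 < st.2 then (st.1.modify p.1 0 (· + (extra + 1)), st.2 - 1)
          else (st.1.modify p.1 0 (· + extra), st.2)) (q, L)).1.getD k 0 =
        q.getD k 0 + pvAmt k (pvFin r L l)) ∧
      (l.foldl (fun (st : PySem.Dict String Int × Int) p =>
          let extra := min r p.2
          if r < p.2 ∧ 0 < st.2 then (st.1.modify p.1 0 (· + (extra + 1)), st.2 - 1)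
          else (st.1.modify p.1 0 (· + extra), st.2)) (q, L)).1.keys = q.keys := by
  intro l
  induction l with
  | nil =>
    intro q L hcont
    exact ⟨fun k => by simp [pvFin, pvAmt], rfl⟩
  | cons p tl ih =>
    intro q L hcont
    have hkeymod : ∀ (a : Int), (q.modify p.1 0 (· + a)).keys = q.keys := by
      intro a
      rw [PySem.Dict.keys_modify, PySem.Dict.keys_insert_of_contains]
      exact hcont p (by simp)
    have hcont' : ∀ (a : Int), ∀ x ∈ tl, (q.modify p.1 0 (· + a)).contains x.1 = true := by
      intro a x hx
      rw [PySem.Dict.contains_modify, hcont x (by simp [hx]), Bool.or_true]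
    have hgetD : ∀ (a : Int) (k : String),
        (q.modify p.1 0 (· + a)).getD k 0 = q.getD k 0 + (if p.1 = k then a else 0) := by
      intro a k
      rw [PySem.Dict.getD_modify]
      by_cases h : k = p.1
      · subst h
        simp
      · rw [if_neg h, if_neg (fun hh => h hh.symm)]
        omega
    by_cases hg : r < p.2 ∧ 0 < L
    · have hIH := ih (q.modify p.1 0 (· + (min r p.2 + 1))) (L - 1) (hcont' _)
      simp only [List.foldl_cons, if_pos hg]
      refine ⟨fun k => ?_, by rw [hIH.2, hkeymod]⟩
      rw [hIH.1 k, hgetD _ k]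
      simp only [pvFin, if_pos hg, pvAmt_cons]
      split_ifs <;> omega
    · have hIH := ih (q.modify p.1 0 (· + min r p.2)) L (hcont' _)
      simp only [List.foldl_cons, if_neg hg]
      refine ⟨fun k => ?_, by rw [hIH.2, hkeymod]⟩
      rw [hIH.1 k, hgetD _ k]
      simp only [pvFin, if_neg hg, pvAmt_cons]
      split_ifs <;> omega

-- B's binary search finds a valid water level
lemma bsearch_spec (caps : List (String × Int)) (R : Int) :
    ∀ (n : Nat) (lo hi : Int), (hi - lo).toNat ≤ n → 0 ≤ lo → lo ≤ hi →
      pvSumMin lo caps ≤ R →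
      (R < pvSumMin (hi + 1) caps ∨ ∀ p ∈ caps, p.2 ≤ hi) →
      0 ≤ pvBSearch caps R lo hi ∧ pvSumMin (pvBSearch caps R lo hi) caps ≤ R ∧
      (R < pvSumMin (pvBSearch caps R lo hi + 1) caps ∨
        ∀ p ∈ caps, p.2 ≤ pvBSearch caps R lo hi) := by
  intro n
  induction n with
  | zero =>
    intro lo hi hn h0 hle hS hcl
    have hstop : ¬ lo < hi := by omega
    rw [pvBSearch, dif_neg hstop]
    have : lo = hi := by omega
    subst this
    exact ⟨h0, hS, hcl⟩
  | succ n ihn =>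
    intro lo hi hn h0 hle hS hcl
    by_cases hlt : lo < hi
    · rw [pvBSearch, dif_pos hlt]
      have hmid : lo < PySem.Int.floordiv (lo + hi + 1) 2 ∧
          PySem.Int.floordiv (lo + hi + 1) 2 ≤ hi := by
        rw [PySem.Int.floordiv_eq_ediv_of_pos (by norm_num : (0:Int) < 2)]
        omega
      set mid := PySem.Int.floordiv (lo + hi + 1) 2 with hmiddef
      by_cases htest : pvSumMin mid caps ≤ R
      · rw [if_pos htest]
        exact ihn mid hi (by omega) (by omega) (by omega) htest hcl
      · rw [if_neg htest]
        refine ihn lo (mid - 1) (by omega) h0 ?_ hS ?_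
        · -- lo ≤ mid - 1: a failed test at mid means lo < mid
          omega
        · left
          rw [show mid - 1 + 1 = mid from by ring]
          omega
    · rw [pvBSearch, dif_neg hlt]
      have : lo = hi := by omega
      subst this
      exact ⟨h0, hS, hcl⟩

-- ===== VERDICT (by name: the statement is the Claim_ definition above) =====
theorem compute_per_class_quota_spec : Claim_equal_compute_per_class_quota := by
  intro ac total hdom hpre
  obtain ⟨hne, htot⟩ := hpre
  unfold Spec_compute_per_class_quota
  unfold compute_per_class_quota compute_per_class_quota_alt
  set acd := PySem.Dict.ofList ac with hacd
  by_cases hn : (acd.size : Int) = 0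
  · simp [hn]
  · simp only [if_neg hn]
    set base := PySem.Int.floordiv total (acd.size : Int) with hbase
    set q0 := acd.items.foldl (fun d kv => d.insert kv.1 (min base kv.2)) PySem.Dict.empty with hq0
    set R := total - q0.values.sum with hR
    by_cases hRpos : 0 < R
    · simp only [if_pos hRpos]
      set caps := PySem.List.sorted (acd.keys.map (fun k => (k, acd.getD k 0 - q0.getD k 0)))
        (fun x => -x.2) false with hcaps
      -- facts about the initial quota dict
      have hknd : acd.keys.Nodup := PySem.Dict.nodup_keys_ofList ac
      have hq0items : q0.items = acd.items.map (fun a => (a.1, min base a.2)) := by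
        have h := PySem.Dict.items_foldl_insert_fresh (ν := Int) acd.items
          (fun kv : String × Int => kv.1) (fun kv : String × Int => min base kv.2)
          PySem.Dict.empty (fun a _ => PySem.Dict.contains_empty a.1) hknd
        simpa using h
      have hq0keys : q0.keys = acd.keys := by
        show q0.items.map (·.1) = acd.keys
        rw [hq0items, List.map_map]
        rfl
      have hq0nd : q0.keys.Nodup := hq0keys ▸ hknd
      have hq0getD : ∀ p ∈ acd.items, q0.getD p.1 0 = min base p.2 := by
        intro p hp
        exact PySem.Dict.getD_of_mem_items q0 (by rw [hq0items]; exact List.mem_map_of_mem hp)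
          hq0nd 0
      have hacdgetD : ∀ p ∈ acd.items, acd.getD p.1 0 = p.2 := by
        intro p hp
        exact PySem.Dict.getD_of_mem_items acd (by rwa [Prod.mk.eta]) hknd 0
      -- facts about the sorted caps list
      have hperm : caps.Perm (acd.keys.map (fun k => (k, acd.getD k 0 - q0.getD k 0))) := by
        rw [hcaps]
        exact PySem.List.sorted_perm _ _ _
      have hcmem : ∀ p ∈ caps, ∃ v, (p.1, v) ∈ acd.items ∧ p.2 = v - min base v := by
        intro p hp
        obtain ⟨k, hk, rfl⟩ := List.mem_map.mp (hperm.mem_iff.mp hp)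
        obtain ⟨x, hx, hxk⟩ := List.mem_map.mp (show k ∈ acd.items.map (·.1) from hk)
        refine ⟨x.2, ?_, ?_⟩
        · show (k, x.2) ∈ acd.items
          rw [← hxk]
          rwa [Prod.mk.eta]
        · show acd.getD k 0 - q0.getD k 0 = x.2 - min base x.2
          rw [← hxk, hacdgetD x hx, hq0getD x hx]
      have hc0 : ∀ p ∈ caps, 0 ≤ p.2 := by
        intro p hp
        obtain ⟨v, _, h2⟩ := hcmem p hp
        omega
      have hinv0 : ∀ p ∈ caps, p.2 = acd.getD p.1 0 - q0.getD p.1 0 := by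
        intro p hp
        obtain ⟨k, hk, rfl⟩ := List.mem_map.mp (hperm.mem_iff.mp hp)
        rfl
      have hfst : (acd.keys.map (fun k => (k, acd.getD k 0 - q0.getD k 0))).map (·.1) =
          acd.keys := by
        rw [List.map_map]
        calc List.map ((fun x : String × Int => x.1) ∘ fun k => (k, acd.getD k 0 - q0.getD k 0))
              acd.keys
            = List.map id acd.keys := List.map_congr_left (fun k _ => rfl)
          _ = acd.keys := List.map_id _
      have hcnd : (caps.map (·.1)).Nodup := by
        refine (List.Perm.nodup_iff (hperm.map (·.1))).mpr ?_
        rw [hfst]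
        exact hknd
      have hcont0 : ∀ p ∈ caps, q0.contains p.1 = true := by
        intro p hp
        rw [PySem.Dict.contains_iff_mem_keys, hq0keys]
        obtain ⟨k, hk, rfl⟩ := List.mem_map.mp (hperm.mem_iff.mp hp)
        exact hk
      have hRle : R ≤ (caps.map (·.2)).sum := by
        have hps : (caps.map (·.2)).sum =
            ((acd.keys.map (fun k => (k, acd.getD k 0 - q0.getD k 0))).map (·.2)).sum :=
          (hperm.map (·.2)).sum_eq
        have hsnd : (acd.keys.map (fun k => (k, acd.getD k 0 - q0.getD k 0))).map (·.2) =
            acd.keys.map (fun k => acd.getD k 0 - q0.getD k 0) := by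
          rw [List.map_map]
          rfl
        have hsnd2 : acd.keys.map (fun k => acd.getD k 0 - q0.getD k 0) =
            acd.items.map (fun p => p.2 - min base p.2) := by
          show (acd.items.map (·.1)).map (fun k => acd.getD k 0 - q0.getD k 0) = _
          rw [List.map_map]
          apply List.map_congr_left
          intro p hp
          show acd.getD p.1 0 - q0.getD p.1 0 = p.2 - min base p.2
          rw [hacdgetD p hp, hq0getD p hp]
        have e1 : ((acd.keys.map (fun k => (k, acd.getD k 0 - q0.getD k 0))).map (·.2)).sum =
            (acd.items.map (fun p => p.2 - min base p.2)).sum := by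
          rw [hsnd, hsnd2]
        have hvals : q0.values.sum = (acd.items.map (fun p => min base p.2)).sum := by
          show (q0.items.map (·.2)).sum = _
          rw [hq0items, List.map_map]
          rfl
        have hsub := pv_sum_sub acd.items (fun p => min base p.2)
        have hav : acd.values.sum = (acd.items.map (·.2)).sum := rfl
        omega
      -- the maximum capacity
      have hcne : caps ≠ [] := by
        rw [hcaps, Ne, PySem.List.sorted_eq_nil_iff, List.map_eq_nil_iff]
        intro hkeys
        apply hn
        have : acd.items = [] := by
          have := congrArg List.length (show acd.items.map (·.1) = [] from hkeys)
          simpa using this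
        show ((acd.items.length : Nat) : Int) = 0
        rw [this]
        rfl
      obtain ⟨m, hm⟩ : ∃ m, PySem.List.max? (caps.map (fun p => p.2)) (fun c => c) = some m := by
        cases hmx : PySem.List.max? (caps.map (fun p => p.2)) (fun c => c) with
        | none =>
          exact absurd ((PySem.List.max?_eq_none_iff _ _).mp hmx)
            (by simpa using hcne)
        | some m => exact ⟨m, rfl⟩
      have hmax : ∀ p ∈ caps, p.2 ≤ m := by
        intro p hp
        simpa using PySem.List.max?_isMax hm _ (List.mem_map_of_mem hp)
      have hm0 : 0 ≤ m := by
        obtain ⟨p, hp, hpm⟩ := List.mem_map.mp (PySem.List.max?_mem hm)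
        rw [← hpm]
        exact hc0 p hp
      rw [hm]
      -- the binary-search water level
      obtain ⟨hT0, hTle, hTcl⟩ := bsearch_spec caps R (m - 0).toNat 0 m le_rfl le_rfl hm0
        (by rw [pvSumMin_zero caps hc0]; omega) (Or.inr hmax)
      have hA := loopA_spec acd R.toNat q0 R caps (pvBSearch caps R 0 m) le_rfl hRpos hRle
        hc0 hcnd hinv0 hcont0 hT0 hTle hTcl
      have hB := foldB_spec (pvBSearch caps R 0 m) caps q0 (R - pvSumMin (pvBSearch caps R 0 m) caps)
        hcont0
      rw [PySem.Dict.items_eq_map_keys _ (by rw [hA.2]; exact hq0nd) 0,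
          PySem.Dict.items_eq_map_keys _ (by rw [hB.2]; exact hq0nd) 0,
          hA.2, hB.2]
      apply List.map_congr_left
      intro k hk
      simp only [hA.1 k, hB.1 k]
    · simp only [if_neg hRpos]
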